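-- pv_equiv track=rewrite | github.com/blackmsk/Programmers-coding-test | 프로그래머스/0/181921. 배열 만들기 2/배열 만들기 2.py | solution
-- ===== SOURCE A (Python) =====
-- def digit_length(n):
--     ans = 0
--     while n:
--         n //= 10
--         ans += 1
--     return ans
--
-- def solution(l, r):
--     answer = []
--     for i in range(2**(digit_length(l)-1),2**(digit_length(r))):
--         a = format (i, 'b')
--         b = a.replace('1','5')
--         if int(b)<=r:
--             if int(b)>=l:
--                 answer.append(int(b))
--         else:
--             break
--     if answer==[]:
--         answer.append(-1)
--     return answer
-- ===== SOURCE B (Python) =====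
-- def solution(l, r):
--     # Count candidate digit-lengths to consider: levels = smallest k with 5*10**k > r.
--     levels = 0
--     p = 5
--     while p <= r:
--         levels += 1
--         p *= 10
--     # Breadth-first by length: level k holds every (k+1)-digit number made of
--     # digits 0/5 with leading digit 5, in increasing order; collect those in [l, r].
--     answer = []
--     candidates = [5]
--     for _ in range(levels):
--         answer += [v for v in candidates if l <= v <= r]
--         candidates = [10 * v + d for v in candidates for d in (0, 5)]
--     if not answer:
--         answer = [-1]
--     return answer
-- ===== Notes on version B (the rewrite author's own statement) =====
-- stated objective: alternative
-- what changed: B generates the 0/5-digit candidates directly, breadth-first by digit length (each level maps v to 10*v and 10*v+5), instead of A's counting an integer upward and reinterpreting its binary string with '1' replaced by '5'; B does pure integer arithmetic, no string formatting/parsing.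
import Mathlib
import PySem

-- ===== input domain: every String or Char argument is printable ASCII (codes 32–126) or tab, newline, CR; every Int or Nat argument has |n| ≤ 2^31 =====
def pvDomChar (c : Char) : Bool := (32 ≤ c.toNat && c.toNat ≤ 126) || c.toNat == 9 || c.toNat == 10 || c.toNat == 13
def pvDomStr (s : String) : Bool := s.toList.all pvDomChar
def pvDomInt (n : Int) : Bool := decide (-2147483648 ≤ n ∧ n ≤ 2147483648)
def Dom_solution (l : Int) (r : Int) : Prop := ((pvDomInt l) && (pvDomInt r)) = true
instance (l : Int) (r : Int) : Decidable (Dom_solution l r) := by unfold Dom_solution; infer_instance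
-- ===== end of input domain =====

-- B replaces A's binary-counter-plus-string-replace enumeration by direct breadth-first
-- generation of the 0/5-digit candidates (level k maps v to 10*v and 10*v+5), pure integer
-- arithmetic instead of string formatting/parsing; equivalence is proved on Pre_ (l ≥ 1, r ≥ 0),
-- exactly the inputs where Python's A returns (l = 0 raises TypeError, negative l or r diverge).


-- ===== PORT A =====
-- `while n: n //= 10; ans += 1`.  Python diverges for n < 0, which Pre_ excludes;
-- the `0 < n` guard (instead of `n ≠ 0`) only makes the recursion total, it agrees with
-- Python on every n ≥ 0.
def digitLengthGo (n : Int) (ans : Int) : Int :=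
  if h : 0 < n then digitLengthGo (PySem.Int.floordiv n 10) (ans + 1) else ans
termination_by n.toNat
decreasing_by
  rw [PySem.Int.floordiv_eq_ediv_of_pos (by omega : (0:Int) < 10)]; omega

def digit_length (n : Int) : Int := digitLengthGo n 0

-- the `for i in range(...)` loop with its `break`; the `none` branch mirrors int(b)'s
-- ValueError, which never fires (b is always a valid integer literal).
def solutionGo (l : Int) (r : Int) (idxs : List Int) (answer : List Int) : List Int :=
  match idxs with
  | [] => answer
  | i :: rest =>
    let a := PySem.Int.toBin i
    let b := PySem.Str.replace a "1" "5"
    match PySem.Int.ofStr? b with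
    | none => answer
    | some v =>
      if v ≤ r then
        (if v ≥ l then solutionGo l r rest (answer ++ [v]) else solutionGo l r rest answer)
      else answer

-- 2**(digit_length(l)-1): for l ≥ 1 the exponent is ≥ 0; for l = 0 Python's 2**-1 is a float
-- and range raises TypeError (outside Pre_).
def solution (l : Int) (r : Int) : List Int :=
  let answer := solutionGo l r
    (PySem.List.pyRange (2 ^ (digit_length l - 1).toNat) (2 ^ (digit_length r).toNat)) []
  if answer = [] then answer ++ [-1] else answer

-- ===== PORT B =====
-- `while p <= r: levels += 1; p *= 10`.  In B, p is always 5·10^k > 0; the `0 < p`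
-- conjunct is a totality guard only.
def levelsGo (r : Int) (levels : Int) (p : Int) : Int :=
  if h : p ≤ r ∧ 0 < p then levelsGo r (levels + 1) (p * 10) else levels
termination_by (r + 1 - p).toNat
decreasing_by omega

def solution_alt (l : Int) (r : Int) : List Int :=
  let st := (PySem.List.pyRange 0 (levelsGo r 0 5)).foldl
    (fun (st : List Int × List Int) _ =>
      (st.1 ++ st.2.filter (fun v => decide (l ≤ v ∧ v ≤ r)),
       st.2.flatMap (fun v => [10 * v, 10 * v + 5])))
    ([], [5])
  if st.1 = [] then [-1] else st.1

-- ===== PRECONDITION & SPEC =====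
-- Pre_ is exactly where Python's A returns: l = 0 raises TypeError (float passed to range),
-- l < 0 or r < 0 make digit_length loop forever.
def Pre_solution (l : Int) (r : Int) : Prop := 1 ≤ l ∧ 0 ≤ r
instance (l : Int) (r : Int) : Decidable (Pre_solution l r) := by unfold Pre_solution; infer_instance
def pvWitness_solution : Int × Int := (3, 600)

def Spec_solution (l : Int) (r : Int) (out : List Int) : Prop := out = solution_alt l r
instance (l : Int) (r : Int) (out : List Int) : Decidable (Spec_solution l r out) := by unfold Spec_solution; infer_instance

-- ===== CLAIM (what is proved, stated in full; the proofs are below) =====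
def Claim_equal_solution : Prop := ∀ (l : Int) (r : Int), Dom_solution l r → Pre_solution l r → Spec_solution l r (solution l r)

-- ===== LEMMAS AND PROOFS =====

-- `D n` reads the binary digits of n as a decimal number (fuel-structural so `decide` can
-- evaluate it); `val i = 5 * D i` is the number A's loop derives from iteration i, and also
-- the entry of B's level lists at index i.
def Dgo : Nat → Nat → Int
  | 0, _ => 0
  | f+1, n => if n = 0 then 0 else 10 * Dgo f (n / 2) + (n % 2 : Nat)

def D (n : Nat) : Int := Dgo n n

def val (i : Int) : Int := 5 * D i.toNat
theorem Dgo_congr : ∀ (f g n : Nat), n ≤ f → n ≤ g → Dgo f n = Dgo g n := by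
  intro f
  induction f with
  | zero => intro g n hf hg; interval_cases n; cases g <;> simp [Dgo]
  | succ f ih =>
    intro g n hf hg
    match g with
    | 0 => interval_cases n; simp [Dgo]
    | g+1 =>
      simp only [Dgo]
      rcases Nat.eq_zero_or_pos n with h | h
      · simp [h]
      · rw [ih g (n/2) (by omega) (by omega)]

theorem D_rec (n : Nat) (h : n ≠ 0) : D n = 10 * D (n / 2) + (n % 2 : Nat) := by
  unfold D
  cases n with
  | zero => omega
  | succ m =>
    simp only [Dgo, Nat.succ_ne_zero, if_false]
    rw [Dgo_congr m ((m+1)/2) ((m+1)/2) (by omega) (by omega)]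

theorem D_pos : ∀ (n : Nat), 1 ≤ n → 1 ≤ D n := by
  intro n
  induction n using Nat.strong_induction_on with
  | _ n ih =>
    intro h1
    rcases Nat.lt_or_ge n 2 with h | h
    · have hn : n = 1 := by omega
      subst hn; decide
    · rw [D_rec n (by omega)]
      have hd := ih (n/2) (by omega) (by omega)
      have hm : (0:Int) ≤ (n % 2 : Nat) := by positivity
      omega

theorem D_mono : ∀ (j i : Nat), i < j → D i < D j := by
  intro j
  induction j using Nat.strong_induction_on with
  | _ j ih =>
    intro i hij
    rcases Nat.eq_zero_or_pos i with h | h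
    · subst h
      have h1 := D_pos j (by omega)
      have h0 : D 0 = 0 := rfl
      omega
    · rw [D_rec j (by omega), D_rec i (by omega)]
      rcases Nat.lt_or_ge (i/2) (j/2) with h2 | h2
      · have hd : D (i/2) < D (j/2) := ih (j/2) (by omega) (i/2) h2
        have hi : (i % 2 : Int) ≤ 1 := by omega
        have hj : (0:Int) ≤ (j % 2 : Nat) := by positivity
        push_cast
        push_cast at hd hi hj
        omega
      · have he : i / 2 = j / 2 := by omega
        have hm : i % 2 < j % 2 := by omega
        rw [he]
        have : (i % 2 : Int) < (j % 2 : Nat) := by exact_mod_cast hm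
        omega

theorem D5_lt : ∀ (k n : Nat), n < 2 ^ k → 5 * D n < 10 ^ k := by
  intro k
  induction k with
  | zero =>
    intro n h
    have h0 : n = 0 := by omega
    subst h0
    decide
  | succ k ih =>
    intro n h
    rcases Nat.eq_zero_or_pos n with h0 | h0
    · subst h0
      have : D 0 = 0 := rfl
      have : (0:Int) < 10 ^ (k+1) := by positivity
      omega
    · rw [D_rec n (by omega)]
      have h2 : n / 2 < 2 ^ k := by omega
      have hd := ih (n/2) h2
      have hm : (n % 2 : Int) ≤ 1 := by omega
      have h10 : (10:Int) ^ (k+1) = 10 * 10 ^ k := by ring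
      omega

theorem D_ge : ∀ (k n : Nat), 2 ^ k ≤ n → (10:Int) ^ k ≤ D n := by
  intro k
  induction k with
  | zero => intro n h; simpa using D_pos n h
  | succ k ih =>
    intro n h
    have h0 := Nat.two_pow_pos (k+1)
    rw [D_rec n (by omega)]
    have h2 : 2 ^ k ≤ n / 2 := by omega
    have hd := ih (n/2) h2
    have hm : (0:Int) ≤ (n % 2 : Nat) := by positivity
    have h10 : (10:Int) ^ (k+1) = 10 * 10 ^ k := by ring
    omega

-- the one finite fact about strings: on every index A's loop can see,
-- int(format(i,'b').replace('1','5')) succeeds and equals val i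
set_option maxRecDepth 1000000 in
set_option maxHeartbeats 4000000 in
theorem ofStr_replace_toBin_all :
    ((List.range' 1 1023).all (fun i =>
      PySem.Int.ofChars? (PySem.Chars.replace (PySem.Int.toBinChars (Int.ofNat i)) ['1'] ['5'])
        == some (5 * D i))) = true := by decide
theorem val_string (i : Int) (h1 : 1 ≤ i) (h2 : i < 1024) :
    PySem.Int.ofStr? (PySem.Str.replace (PySem.Int.toBin i) "1" "5") = some (val i) := by
  have hmem : i.toNat ∈ List.range' 1 1023 := by
    rw [List.mem_range'_1]
    omega
  have h := List.all_eq_true.mp ofStr_replace_toBin_all _ hmem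
  rw [beq_iff_eq] at h
  have hcast : Int.ofNat i.toNat = i := by simpa using Int.toNat_of_nonneg (by omega : 0 ≤ i)
  rw [hcast] at h
  have hs : (PySem.Str.replace (PySem.Int.toBin i) "1" "5").toList
      = PySem.Chars.replace (PySem.Int.toBinChars i) ['1'] ['5'] := by
    rw [PySem.Str.toList_replace, PySem.Int.toList_toBin]
    rfl
  calc PySem.Int.ofStr? (PySem.Str.replace (PySem.Int.toBin i) "1" "5")
      = PySem.Int.ofChars? (PySem.Str.replace (PySem.Int.toBin i) "1" "5").toList := by
        conv_lhs => rw [← @String.ofList_toList (PySem.Str.replace (PySem.Int.toBin i) "1" "5")]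
        rw [PySem.Int.ofStr?_ofList]
    _ = some (val i) := by rw [hs, h]; rfl
theorem val_mono (i j : Int) (h0 : 0 ≤ i) (hij : i ≤ j) : val i ≤ val j := by
  rcases eq_or_lt_of_le hij with h | h
  · rw [h]
  · have : i.toNat < j.toNat := by omega
    have := D_mono j.toNat i.toNat this
    unfold val
    omega

theorem loopA (l r : Int) : ∀ (n : Nat) (s : Int) (acc : List Int), 1 ≤ s → s + n ≤ 1024 →
    solutionGo l r (PySem.List.pyRange s (s + n)) acc
      = acc ++ ((PySem.List.pyRange s (s + n)).map val).filter (fun v => decide (l ≤ v ∧ v ≤ r)) := by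
  intro n
  induction n with
  | zero =>
    intro s acc h1 h2
    rw [PySem.List.pyRange_one_eq_nil (by omega)]
    simp [solutionGo]
  | succ n ih =>
    intro s acc h1 h2
    rw [PySem.List.pyRange_one_cons (by omega)]
    have hstep : s + (n + 1 : Nat) = (s + 1) + (n : Nat) := by push_cast; ring
    simp only [solutionGo]
    rw [val_string s (by omega) (by omega)]
    simp only [List.map_cons, List.filter_cons]
    by_cases hr : val s ≤ r
    · by_cases hl : val s ≥ l
      · rw [if_pos hr, if_pos hl]
        rw [hstep] at *
        rw [ih (s+1) (acc ++ [val s]) (by omega) (by omega)]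
        have : (decide (l ≤ val s ∧ val s ≤ r)) = true := by simp [hl, hr]
        simp [this]
      · rw [if_pos hr, if_neg hl]
        rw [hstep] at *
        rw [ih (s+1) acc (by omega) (by omega)]
        have : (decide (l ≤ val s ∧ val s ≤ r)) = false := by
          simp only [decide_eq_false_iff_not]
          intro hc
          exact hl hc.1
        simp [this]
    · rw [if_neg hr]
      have hd : (decide (l ≤ val s ∧ val s ≤ r)) = false := by
        simp only [decide_eq_false_iff_not]
        intro hc
        exact hr hc.2
      simp only [hd, Bool.false_eq_true, if_false, List.self_eq_append_right]
      rw [List.filter_eq_nil_iff]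
      intro v hv
      simp only [List.mem_map] at hv
      obtain ⟨j, hj, rfl⟩ := hv
      rw [PySem.List.mem_pyRange_one] at hj
      have hm : val s ≤ val j := val_mono s j (by omega) (by omega)
      simp only [decide_eq_true_eq]
      intro hc
      omega
theorem val_double (i : Int) (h : 1 ≤ i) :
    val (2 * i) = 10 * val i ∧ val (2 * i + 1) = 10 * val i + 5 := by
  unfold val
  constructor
  · rw [D_rec (2*i).toNat (by omega)]
    have h2 : (2*i).toNat / 2 = i.toNat := by omega
    have h3 : (2*i).toNat % 2 = 0 := by omega
    rw [h2, h3]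
    push_cast
    ring
  · rw [D_rec (2*i+1).toNat (by omega)]
    have h2 : (2*i+1).toNat / 2 = i.toNat := by omega
    have h3 : (2*i+1).toNat % 2 = 1 := by omega
    rw [h2, h3]
    push_cast
    ring

theorem flatMapRange : ∀ (n : Nat) (s : Int), 1 ≤ s →
    ((PySem.List.pyRange s (s + n)).map val).flatMap (fun v => [10 * v, 10 * v + 5])
      = (PySem.List.pyRange (2*s) (2*(s + n))).map val := by
  intro n
  induction n with
  | zero =>
    intro s h1
    rw [PySem.List.pyRange_one_eq_nil (by omega), PySem.List.pyRange_one_eq_nil (by omega)]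
    simp
  | succ n ih =>
    intro s h1
    push_cast
    rw [PySem.List.pyRange_one_cons (by omega : s < s + ((n:Int)+1))]
    rw [PySem.List.pyRange_one_cons (by omega : 2*s < 2*(s + ((n:Int)+1)))]
    rw [PySem.List.pyRange_one_cons (by omega : 2*s+1 < 2*(s + ((n:Int)+1)))]
    simp only [List.map_cons, List.flatMap_cons]
    obtain ⟨hd0, hd1⟩ := val_double s h1
    have hstep : s + ((n:Int) + 1) = (s + 1) + (n:Int) := by ring
    have hstep2 : 2*s + 1 + 1 = 2*(s+1) := by ring
    rw [hd0, hd1]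
    rw [hstep, hstep2, ih (s+1) (by omega)]
    have : 2 * (s + 1 + (n:Int)) = 2 * (s + ((n:Int) + 1)) := by ring
    rw [this]
    simp
theorem loopB (l r : Int) : ∀ (m : Nat),
    (PySem.List.pyRange 0 (m:Int)).foldl
      (fun (st : List Int × List Int) _ =>
        (st.1 ++ st.2.filter (fun v => decide (l ≤ v ∧ v ≤ r)),
         st.2.flatMap (fun v => [10 * v, 10 * v + 5])))
      ([], [5])
    = ( (((PySem.List.pyRange 1 ((2:Int)^m)).map val).filter (fun v => decide (l ≤ v ∧ v ≤ r))),
        (PySem.List.pyRange ((2:Int)^m) ((2:Int)^(m+1))).map val ) := by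
  intro m
  induction m with
  | zero =>
    simp only [Nat.cast_zero, pow_zero]
    rw [PySem.List.pyRange_one_eq_nil (le_refl 0), PySem.List.pyRange_one_eq_nil (le_refl 1)]
    have h5 : (PySem.List.pyRange 1 2).map val = [5] := by decide
    simp [h5]
  | succ m ih =>
    have hm : ((m+1 : Nat) : Int) = (m : Int) + 1 := by push_cast; ring
    rw [hm, PySem.List.pyRange_one_succ_right (by positivity), List.foldl_append, ih]
    simp only [List.foldl_cons, List.foldl_nil]
    rw [Prod.mk.injEq]
    refine ⟨?_, ?_⟩
    · rw [PySem.List.pyRange_one_append 1 ((2:Int)^m) ((2:Int)^(m+1))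
          (by have := pow_pos (by norm_num : (0:Int) < 2) m; omega)
          (by apply pow_le_pow_right₀ (by norm_num) (by omega))]
      rw [List.map_append, List.filter_append]
    · have hc : ((2^m : Nat) : Int) = (2:Int)^m := by push_cast; ring
      have he : (2:Int)^(m+1) = 2^m + ((2^m : Nat) : Int) := by rw [hc]; ring
      conv_lhs => rw [he]
      rw [flatMapRange (2^m) ((2:Int)^m) (by have := pow_pos (by norm_num : (0:Int) < 2) m; omega)]
      have h1 : 2*((2:Int)^m) = 2^(m+1) := by ring
      have h2 : 2*((2:Int)^m + ((2^m : Nat) : Int)) = 2^(m+1+1) := by rw [hc]; ring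
      rw [h1, h2]
theorem dlGo_spec : ∀ (fuel : Nat) (n : Int), 1 ≤ n → n.toNat ≤ fuel → ∀ ans, ∃ k : Nat,
    digitLengthGo n ans = ans + k ∧ 1 ≤ k ∧ (10:Int)^(k-1) ≤ n ∧ n < 10^k := by
  intro fuel
  induction fuel with
  | zero => intro n h1 h2; omega
  | succ fuel ih =>
    intro n h1 h2 ans
    rw [digitLengthGo, dif_pos (by omega : (0:Int) < n)]
    rw [PySem.Int.floordiv_eq_ediv_of_pos (by omega : (0:Int) < 10)]
    rcases Int.lt_or_le n 10 with h | h
    · have hq : n / 10 = 0 := by omega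
      rw [hq, digitLengthGo, dif_neg (by omega)]
      exact ⟨1, by omega, by omega, by norm_num; omega, by norm_num; omega⟩
    · have hq1 : 1 ≤ n / 10 := by omega
      obtain ⟨k', hk1, hk2, hk3, hk4⟩ := ih (n/10) hq1 (by omega) (ans + 1)
      refine ⟨k' + 1, by omega, by omega, ?_, ?_⟩
      · have : (10:Int)^(k'+1-1) = 10^(k'-1) * 10 := by
          have : k' + 1 - 1 = (k' - 1) + 1 := by omega
          rw [this]; ring
        rw [this]
        omega
      · have : (10:Int)^(k'+1) = 10^k' * 10 := by ring
        rw [this]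
        omega

theorem dl_spec (n : Int) (h1 : 1 ≤ n) : ∃ k : Nat,
    digit_length n = (k:Int) ∧ 1 ≤ k ∧ (10:Int)^(k-1) ≤ n ∧ n < 10^k := by
  obtain ⟨k, hk1, hk2, hk3, hk4⟩ := dlGo_spec n.toNat n h1 (le_refl _) 0
  exact ⟨k, by rw [digit_length, hk1]; ring, hk2, hk3, hk4⟩

theorem dl_zero : digit_length 0 = 0 := by
  rw [digit_length, digitLengthGo]
  norm_num

theorem levelsGo_spec : ∀ (fuel : Nat) (r p ans : Int), 0 < p → (r + 1 - p).toNat ≤ fuel →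
    ∃ k : Nat, levelsGo r ans p = ans + k ∧ r < p * 10^k ∧ (k = 0 ∨ p * 10^(k-1) ≤ r) := by
  intro fuel
  induction fuel with
  | zero =>
    intro r p ans hp hf
    rw [levelsGo, dif_neg (by omega)]
    exact ⟨0, by omega, by norm_num; omega, Or.inl rfl⟩
  | succ fuel ih =>
    intro r p ans hp hf
    by_cases hc : p ≤ r
    · rw [levelsGo, dif_pos ⟨hc, hp⟩]
      obtain ⟨k', hk1, hk2, hk3⟩ := ih r (p * 10) (ans + 1) (by omega) (by omega)
      refine ⟨k' + 1, by rw [hk1]; push_cast; ring, ?_, ?_⟩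
      · have : p * 10^(k'+1) = (p * 10) * 10^k' := by ring
        rw [this]; exact hk2
      · right
        have h9 : k' + 1 - 1 = k' := rfl
        rw [h9]
        rcases hk3 with h0 | hle
        · subst h0; simpa using hc
        · rcases Nat.eq_zero_or_pos k' with h0 | h0
          · subst h0
            simp only [pow_zero, mul_one]
            simp only [Nat.zero_sub, pow_zero, mul_one] at hle
            omega
          · obtain ⟨k'', rfl⟩ : ∃ k'', k' = k'' + 1 := ⟨k' - 1, by omega⟩
            have he : p * 10 ^ (k'' + 1) = p * 10 * 10 ^ (k'' + 1 - 1) := by norm_num; ring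
            rw [he]
            exact hle
    · rw [levelsGo, dif_neg (by omega)]
      exact ⟨0, by omega, by norm_num; omega, Or.inl rfl⟩
-- cast helpers
theorem two_pow_cast (k : Nat) : ((2^k : Nat) : Int) = (2:Int)^k := by push_cast; ring

theorem val_lt_high (j : Int) (k : Nat) (hj : j < (2:Int)^k) : val j < (10:Int)^k := by
  have hc := two_pow_cast k
  have h2 : j.toNat < 2^k := by
    have := Nat.two_pow_pos k
    omega
  have := D5_lt k j.toNat h2
  unfold val
  omega

theorem val_ge_low (j : Int) (k : Nat) (hj : (2:Int)^k ≤ j) : 5 * (10:Int)^k ≤ val j := by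
  have hc := two_pow_cast k
  have h2 : 2^k ≤ j.toNat := by
    have := Nat.two_pow_pos k
    omega
  have := D_ge k j.toNat h2
  unfold val
  omega

theorem ten_pow_mono (a b : Nat) (h : a ≤ b) : (10:Int)^a ≤ 10^b :=
  pow_le_pow_right₀ (by norm_num) h

theorem two_pow_mono (a b : Nat) (h : a ≤ b) : (2:Int)^a ≤ 2^b :=
  pow_le_pow_right₀ (by norm_num) h

theorem filter_ext (l r u v : Int) (h1 : 1 ≤ u) (huv : u ≤ v) (hv : v ≤ 1024)
    (hlow : ∀ j : Int, 1 ≤ j → j < u → ¬ (l ≤ val j ∧ val j ≤ r))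
    (hhigh : ∀ j : Int, v ≤ j → j < 1024 → ¬ (l ≤ val j ∧ val j ≤ r)) :
    ((PySem.List.pyRange u v).map val).filter (fun x => decide (l ≤ x ∧ x ≤ r))
      = ((PySem.List.pyRange 1 1024).map val).filter (fun x => decide (l ≤ x ∧ x ≤ r)) := by
  rw [PySem.List.pyRange_one_append 1 u 1024 h1 (by omega),
      PySem.List.pyRange_one_append u v 1024 huv hv]
  simp only [List.map_append, List.filter_append]
  have hnil1 : ((PySem.List.pyRange 1 u).map val).filter (fun x => decide (l ≤ x ∧ x ≤ r)) = [] := by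
    rw [List.filter_eq_nil_iff]
    intro x hx
    simp only [List.mem_map] at hx
    obtain ⟨j, hj, rfl⟩ := hx
    rw [PySem.List.mem_pyRange_one] at hj
    simpa using hlow j hj.1 hj.2
  have hnil2 : ((PySem.List.pyRange v 1024).map val).filter (fun x => decide (l ≤ x ∧ x ≤ r)) = [] := by
    rw [List.filter_eq_nil_iff]
    intro x hx
    simp only [List.mem_map] at hx
    obtain ⟨j, hj, rfl⟩ := hx
    rw [PySem.List.mem_pyRange_one] at hj
    simpa using hhigh j hj.1 hj.2
  rw [hnil1, hnil2]
  simp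

theorem main_glue (l r : Int) (hdom : -2147483648 ≤ l ∧ l ≤ 2147483648 ∧ -2147483648 ≤ r ∧ r ≤ 2147483648)
    (hl1 : 1 ≤ l) (hr0 : 0 ≤ r) : solution l r = solution_alt l r := by
  obtain ⟨ka, hka, hka1, hkal, hkau⟩ := dl_spec l hl1
  have hkbE : ∃ kb : Nat, digit_length r = (kb:Int) ∧ r < 10^kb ∧ (kb = 0 ∨ (10:Int)^(kb-1) ≤ r) := by
    rcases eq_or_lt_of_le hr0 with h | h
    · exact ⟨0, by rw [← h]; exact dl_zero, by rw [← h]; norm_num, Or.inl rfl⟩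
    · obtain ⟨kb, h1, h2, h3, h4⟩ := dl_spec r (by omega)
      exact ⟨kb, h1, h4, Or.inr h3⟩
  obtain ⟨kb, hkb, hkbu, hkbl⟩ := hkbE
  obtain ⟨m, hm, hmu, hml⟩ := levelsGo_spec ((r + 1 - 5).toNat) r 5 0 (by norm_num) (le_refl _)
  -- exponent bounds
  have hka10 : ka ≤ 10 := by
    by_contra hcon
    have : (10:Int)^10 ≤ 10^(ka-1) := ten_pow_mono 10 (ka-1) (by omega)
    have : (10:Int)^10 = 10000000000 := by norm_num
    omega
  have hkb10 : kb ≤ 10 := by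
    rcases hkbl with h | h
    · omega
    · by_contra hcon
      have : (10:Int)^10 ≤ 10^(kb-1) := ten_pow_mono 10 (kb-1) (by omega)
      have : (10:Int)^10 = 10000000000 := by norm_num
      omega
  have hm10 : m ≤ 10 := by
    rcases hml with h | h
    · omega
    · by_contra hcon
      have : (10:Int)^10 ≤ 10^(m-1) := ten_pow_mono 10 (m-1) (by omega)
      have : (10:Int)^10 = 10000000000 := by norm_num
      omega
  -- the two loop results
  have hexpA : (digit_length l - 1).toNat = ka - 1 := by omega
  have hexpB : (digit_length r).toNat = kb := by omega
  have h2kb : (2:Int)^kb ≤ 1024 := by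
    have := two_pow_mono kb 10 hkb10
    norm_num at this
    omega
  have h2m : (2:Int)^m ≤ 1024 := by
    have := two_pow_mono m 10 hm10
    norm_num at this
    omega
  have hSpos : (1:Int) ≤ 2^(ka-1) := by
    have := pow_pos (by norm_num : (0:Int) < 2) (ka-1)
    omega
  -- B side value
  have hlev : levelsGo r 0 5 = (m : Int) := by omega
  have hr5 : r < 5 * 10^m := by
    have : (5:Int) * 10^m = 5 * 10^m := rfl
    omega
  -- high exclusion for B
  have hhighB : ∀ j : Int, (2:Int)^m ≤ j → j < 1024 → ¬ (l ≤ val j ∧ val j ≤ r) := by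
    intro j hj _
    have := val_ge_low j m hj
    intro hc
    have h5m : (5:Int) * 10^m ≤ val j := this
    omega
  -- A's filtered list equals B's filtered list
  have hBfilter := loopB l r m
  unfold solution solution_alt
  rw [hlev, hexpA, hexpB, hBfilter]
  simp only []
  by_cases hcase : (2:Int)^(ka-1) ≤ 2^kb
  · -- A's range is nonempty (as an interval)
    have hn : (2:Int)^kb = 2^(ka-1) + (((2:Int)^kb - (2:Int)^(ka-1)).toNat : Int) := by omega
    have hA := loopA l r (((2:Int)^kb - 2^(ka-1)).toNat) ((2:Int)^(ka-1)) [] hSpos (by omega)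
    rw [← hn] at hA
    rw [hA]
    have hAext := filter_ext l r ((2:Int)^(ka-1)) ((2:Int)^kb) hSpos hcase h2kb
      (fun j hj1 hj2 => by
        have := val_lt_high j (ka-1) hj2
        have h10 : (10:Int)^(ka-1) ≤ l := hkal
        intro hc
        omega)
      (fun j hj1 hj2 => by
        have := val_ge_low j kb hj1
        have h5 : (10:Int)^kb ≤ 5 * 10^kb := by
          have := ten_pow_mono 0 kb (by omega)
          norm_num at this
          omega
        intro hc
        omega)
    have hBext := filter_ext l r 1 ((2:Int)^m) (le_refl 1)
      (by have := pow_pos (by norm_num : (0:Int) < 2) m; omega) h2m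
      (fun j hj1 hj2 => by omega)
      hhighB
    rw [hAext, ← hBext]
    simp only [List.nil_append]
    split_ifs with h
    · rw [h]
      rfl
    · rfl
  · -- A's range is empty: everything is filtered out on the B side too
    rw [not_le] at hcase
    rw [PySem.List.pyRange_one_eq_nil (by omega)]
    have hkbka : kb ≤ ka - 1 := by
      by_contra hcon
      have := two_pow_mono ka (kb) (by omega)
      have h2 : (2:Int)^ka = 2^(ka-1) * 2 := by
        have h3 : ka = (ka-1)+1 := by omega
        conv_lhs => rw [h3]
        ring
      omega
    have hBnil : (((PySem.List.pyRange 1 ((2:Int)^m)).map val).filter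
        (fun v => decide (l ≤ v ∧ v ≤ r))) = [] := by
      rw [List.filter_eq_nil_iff]
      intro x hx
      simp only [List.mem_map] at hx
      obtain ⟨j, hj, rfl⟩ := hx
      rw [PySem.List.mem_pyRange_one] at hj
      simp only [decide_eq_true_eq]
      intro hc
      rcases Int.lt_or_le j ((2:Int)^(ka-1)) with hjlt | hjge
      · have := val_lt_high j (ka-1) hjlt
        have h10 : (10:Int)^(ka-1) ≤ l := hkal
        omega
      · have := val_ge_low j (ka-1) hjge
        have h10 : (10:Int)^kb ≤ 10^(ka-1) := ten_pow_mono kb (ka-1) hkbka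
        have h5 : (10:Int)^(ka-1) ≤ 5 * 10^(ka-1) := by
          have := pow_pos (by norm_num : (0:Int) < 10) (ka-1)
          omega
        omega
    rw [hBnil]
    simp [solutionGo]

-- ===== VERDICT (by name: the statement is the Claim_ definition above) =====
theorem solution_spec : Claim_equal_solution := by
  intro l r hdom hpre
  unfold Spec_solution
  have hd : -2147483648 ≤ l ∧ l ≤ 2147483648 ∧ -2147483648 ≤ r ∧ r ≤ 2147483648 := by
    unfold Dom_solution pvDomInt at hdom
    simp only [Bool.and_eq_true, decide_eq_true_eq] at hdom
    tauto
  exact main_glue l r hd hpre.1 hpre.2
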